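-- pv_equiv track=rewrite | github.com/n1c0p/AdventOfCode | 2025/python/src/day_7.py | count_quantum_timelines
-- ===== SOURCE A (Python) =====
-- def count_quantum_timelines(grid):
--     """Conta il numero totale di timeline quantistiche che raggiungono l'uscita."""
--     # Ottiene le dimensioni della griglia
--     rows = len(grid)
--     cols = len(grid[0]) if rows > 0 else 0
--
--     # Cerca la posizione iniziale 'S' nella prima riga
--     start_col = -1
--     for col in range(cols):
--         if grid[0][col] == 'S':
--             start_col = col
--             break
--
--     if start_col == -1:
--         return 0
--
--     # Dizionario che mappa ogni posizione al numero di timeline che la attraversano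
--     # Inizialmente: 1 timeline parte dalla posizione 'S'
--     current_states = {(0, start_col): 1}
--
--     # Processa ogni riga della griglia
--     for row in range(rows):
--         next_states = {}
--
--         # Per ogni posizione con le sue timeline
--         for (r, c), count in current_states.items():
--             # Considera solo le posizioni nella riga corrente
--             if r != row:
--                 continue
--
--             # Calcola la prossima riga
--             next_row = row + 1
--
--             # Se la prossima riga esce dal manifold
--             if next_row >= rows:
--                 # Conta queste timeline come uscite
--                 if 'exit' not in next_states:
--                     next_states['exit'] = 0
--                 next_states['exit'] += count
--                 continue
--
--             # Controlla il contenuto della cella successiva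
--             if grid[next_row][c] == '^':
--                 # Splitter: ogni timeline si divide in due
--                 # Una va a sinistra
--                 if c > 0:
--                     key = (next_row, c - 1)
--                     next_states[key] = next_states.get(key, 0) + count
--
--                 # Una va a destra
--                 if c < cols - 1:
--                     key = (next_row, c + 1)
--                     next_states[key] = next_states.get(key, 0) + count
--             else:
--                 # Spazio vuoto: le timeline continuano nella stessa colonna
--                 key = (next_row, c)
--                 next_states[key] = next_states.get(key, 0) + count
--
--         # Aggiorna gli stati per la prossima iterazione
--         current_states = next_states
--
--     # Restituisce il numero totale di timeline che hanno raggiunto l'uscita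
--     return current_states.get('exit', 0)
-- ===== SOURCE B (Python) =====
-- def count_quantum_timelines(grid):
--     """Conta il numero totale di timeline quantistiche che raggiungono l'uscita."""
--     rows = len(grid)
--     if rows == 0:
--         return 0
--     cols = len(grid[0])
--     start_col = next((c for c in range(cols) if grid[0][c] == 'S'), -1)
--     if start_col == -1:
--         return 0
--     # Backward DP: ways[c] = number of timelines that reach the exit from (r, c).
--     ways = [1] * cols  # from the last row, every timeline exits
--     for r in range(rows - 2, -1, -1):
--         nxt = grid[r + 1]
--         new = []
--         for c in range(cols):
--             if nxt[c] == '^':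
--                 w = (ways[c - 1] if c > 0 else 0) + (ways[c + 1] if c < cols - 1 else 0)
--             else:
--                 w = ways[c]
--             new.append(w)
--         ways = new
--     return ways[start_col]
-- ===== Notes on version B (the rewrite author's own statement) =====
-- stated objective: alternative
-- what changed: Replaces A's forward simulation with a dictionary of weighted (row,col) states by a backward exit-count dynamic program: one Int array per row, filled from the last row upward, answered at the S column.
-- outside the precondition, e.g. on count_quantum_timelines(['S.', '.']): A returns 1, B raises IndexError
import Mathlib
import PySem

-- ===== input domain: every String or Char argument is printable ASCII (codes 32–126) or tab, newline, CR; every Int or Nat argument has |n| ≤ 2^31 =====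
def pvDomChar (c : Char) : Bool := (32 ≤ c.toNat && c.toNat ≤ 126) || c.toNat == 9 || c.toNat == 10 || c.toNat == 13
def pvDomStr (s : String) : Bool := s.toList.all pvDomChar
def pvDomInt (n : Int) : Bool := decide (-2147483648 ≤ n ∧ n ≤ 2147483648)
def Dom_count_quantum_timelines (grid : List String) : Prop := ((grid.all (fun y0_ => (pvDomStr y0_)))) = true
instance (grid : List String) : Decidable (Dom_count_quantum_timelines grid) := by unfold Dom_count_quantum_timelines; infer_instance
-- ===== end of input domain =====

-- B replaces A's forward dict-of-states simulation by a backward exit-count DP (one array per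
-- row, filled from the last row upward); objective: alternative algorithm, similar cost.

-- ===== PORT A =====
-- A's dict mixes tuple keys (row, col) with the string key 'exit'; ported as
-- Option (Int × Int): `none` is 'exit', `some (r, c)` a tuple key.

-- one step of A's inner loop: `for (r, c), count in current_states.items(): …`
def cqtStep (grid : List String) (rows cols row : Int)
    (d : PySem.Dict (Option (Int × Int)) Int) (e : (Option (Int × Int)) × Int) :
    PySem.Dict (Option (Int × Int)) Int :=
  match e with
  | (none, _) => d
      -- the 'exit' key never occurs in a dict that gets iterated (it is only created on the
      -- last row, after which the loop ends), so this branch is unreachable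
  | (some (r, c), count) =>
    if r ≠ row then d
    else
      let next_row := row + 1
      if next_row ≥ rows then d.insert none (d.getD none 0 + count)
      else
        match PySem.List.pyGet? grid next_row with
        | none => d   -- IndexError (cannot happen: 0 ≤ next_row < rows)
        | some s =>
          match PySem.Str.pyGet? s c with
          | none => d -- IndexError on a ragged grid: excluded by Pre_
          | some ch =>
            if ch = '^' then
              let d1 := if c > 0 then d.insert (some (next_row, c - 1)) (d.getD (some (next_row, c - 1)) 0 + count) else d
              if c < cols - 1 then d1.insert (some (next_row, c + 1)) (d1.getD (some (next_row, c + 1)) 0 + count) else d1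
            else d.insert (some (next_row, c)) (d.getD (some (next_row, c)) 0 + count)

-- A's first loop: `for col in range(cols): if grid[0][col] == 'S': start_col = col; break`
def cqtFindS (row0 : String) : List Int → Int
  | [] => -1
  | c :: rest => if PySem.Str.pyGet? row0 c = some 'S' then c else cqtFindS row0 rest

def count_quantum_timelines (grid : List String) : Int :=
  let rows : Int := grid.length
  let cols : Int := if rows > 0 then PySem.Str.len (grid.headD "") else 0
  let start_col : Int := cqtFindS (grid.headD "") (PySem.List.pyRange 0 cols)
  if start_col = -1 then 0
  else
    let init : PySem.Dict (Option (Int × Int)) Int := PySem.Dict.empty.insert (some (0, start_col)) 1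
    let final := (PySem.List.pyRange 0 rows).foldl
      (fun cur row => cur.items.foldl (cqtStep grid rows cols row) PySem.Dict.empty) init
    final.getD none 0

-- ===== PORT B =====
-- one row of B's backward DP (indices c-1, c, c+1 are always < length of `ways` = cols)
def cqtAltRow (nxt : List Char) (cols : Nat) (ways : List Int) : List Int :=
  (List.range cols).map (fun c =>
    if nxt.getD c ' ' = '^' then
      (if 0 < c then ways.getD (c - 1) 0 else 0) + (if c < cols - 1 then ways.getD (c + 1) 0 else 0)
    else ways.getD c 0)

def count_quantum_timelines_alt (grid : List String) : Int :=
  match grid with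
  | [] => 0
  | row0 :: rest =>
    let cols := row0.toList.length
    match (List.range cols).find? (fun c => row0.toList.getD c ' ' == 'S') with
    | none => 0
    | some start_col =>
      let ways := ((rest.map String.toList).reverse).foldl
        (fun w nxt => cqtAltRow nxt cols w) (List.replicate cols 1)
      ways.getD start_col 0

-- ===== PRECONDITION & SPEC =====
-- Pre_ excludes ragged grids that have an 'S' in row 0: there A may raise IndexError or may
-- return (depending on which cells the timelines dynamically reach), while B scans every row
-- up to len(grid[0]) and raises; on grids with no 'S' in row 0 (or empty) both always return.
def Pre_count_quantum_timelines (grid : List String) : Prop :=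
  grid = [] ∨ 'S' ∉ (grid.headD "").toList ∨
    ∀ s ∈ grid, (grid.headD "").toList.length ≤ s.toList.length
instance (grid : List String) : Decidable (Pre_count_quantum_timelines grid) := by
  unfold Pre_count_quantum_timelines; infer_instance

def pvWitness_count_quantum_timelines : List String := ["S^.", "^.^", "..."]

def Spec_count_quantum_timelines (grid : List String) (out : Int) : Prop := out = count_quantum_timelines_alt grid
instance (grid : List String) (out : Int) : Decidable (Spec_count_quantum_timelines grid out) := by unfold Spec_count_quantum_timelines; infer_instance

-- ===== CLAIM (what is proved, stated in full; the proofs are below) =====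
def Claim_equal_count_quantum_timelines : Prop := ∀ (grid : List String), Dom_count_quantum_timelines grid → Pre_count_quantum_timelines grid → Spec_count_quantum_timelines grid (count_quantum_timelines grid)

-- ===== LEMMAS AND PROOFS =====

-- raw association-list forms of the PySem.Dict operations used by A
def cqtIns (l : List ((Option (Int × Int)) × Int)) (k : Option (Int × Int)) (v : Int) :
    List ((Option (Int × Int)) × Int) :=
  if l.any (fun p => p.1 == k) then l.map (fun p => if p.1 == k then (k, v) else p)
  else l ++ [(k, v)]

def cqtGet (l : List ((Option (Int × Int)) × Int)) (k : Option (Int × Int)) : Int :=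
  ((l.find? (fun p => p.1 == k)).map (fun p => p.2)).getD 0

-- Σ count · weight(key) over a dict's items
def cqtSumW (w : Option (Int × Int) → Int) (l : List ((Option (Int × Int)) × Int)) : Int :=
  (l.map (fun p => p.2 * w p.1)).sum

lemma cqt_insert_items (d : PySem.Dict (Option (Int × Int)) Int) (k : Option (Int × Int)) (v : Int) :
    (d.insert k v).items = cqtIns d.items k v := by
  unfold PySem.Dict.insert cqtIns PySem.Dict.contains
  split <;> rfl

lemma cqt_getD_eq (d : PySem.Dict (Option (Int × Int)) Int) (k : Option (Int × Int)) :
    d.getD k 0 = cqtGet d.items k := rfl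

lemma cqtSumW_map (w : Option (Int × Int) → Int) :
    ∀ (l : List ((Option (Int × Int)) × Int)) (k : Option (Int × Int)) (v u : Int),
      (l.map (fun p => p.1)).Nodup → l.any (fun p => p.1 == k) = true → u = cqtGet l k + v →
      cqtSumW w (l.map (fun p => if p.1 == k then (k, u) else p)) = cqtSumW w l + v * w k := by
  intro l
  induction l with
  | nil => intro k v u _ h; simp at h
  | cons p t ih =>
    intro k v u hnd hany hu
    simp only [List.map_cons, List.nodup_cons, List.mem_map] at hnd
    by_cases hp : p.1 = k
    · have hmap : t.map (fun q => if q.1 == k then (k, u) else q) = t := by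
        apply List.map_congr_left ?_ |>.trans (List.map_id t)
        intro q hq
        have : q.1 ≠ k := fun h => hnd.1 ⟨q, hq, by rw [h, hp]⟩
        simp [this]
      have hget : cqtGet (p :: t) k = p.2 := by
        simp [cqtGet, hp]
      simp only [List.map_cons, hp, beq_self_eq_true, if_true, hmap]
      simp only [cqtSumW, List.map_cons, List.sum_cons]
      rw [hu, hget, hp]; ring
    · have hget : cqtGet (p :: t) k = cqtGet t k := by
        simp [cqtGet, hp]
      have hany' : t.any (fun q => q.1 == k) = true := by
        cases hh : t.any (fun q => q.1 == k) with
        | true => rfl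
        | false => exfalso; simp [List.any_cons, hh, hp] at hany
      have hbeq : (p.1 == k) = false := by simp [hp]
      simp only [List.map_cons, hbeq, Bool.false_eq_true, if_false]
      simp only [cqtSumW, List.map_cons, List.sum_cons] at *
      rw [ih k v u hnd.2 hany' (by rw [hu, hget])]
      ring

lemma cqtSumW_ins (w : Option (Int × Int) → Int) (l : List ((Option (Int × Int)) × Int))
    (k : Option (Int × Int)) (v : Int) (hnd : (l.map (fun p => p.1)).Nodup) :
    cqtSumW w (cqtIns l k (cqtGet l k + v)) = cqtSumW w l + v * w k := by
  unfold cqtIns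
  by_cases h : l.any (fun p => p.1 == k) = true
  · rw [if_pos h]
    exact cqtSumW_map w l k v _ hnd h rfl
  · rw [if_neg h]
    have hall : ∀ x ∈ l, ¬ ((x.1 == k) = true) := by
      intro x hx hbeq
      exact h (List.any_eq_true.mpr ⟨x, hx, hbeq⟩)
    have hget : cqtGet l k = 0 := by
      have hnone : l.find? (fun p => p.1 == k) = none := List.find?_eq_none.mpr hall
      simp [cqtGet, hnone]
    simp [cqtSumW, List.map_append, List.sum_append, hget]

lemma cqtIns_keys_sub (l : List ((Option (Int × Int)) × Int)) (k : Option (Int × Int)) (v : Int) :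
    ∀ k' ∈ (cqtIns l k v).map (fun p => p.1), k' ∈ l.map (fun p => p.1) ∨ k' = k := by
  intro k' hk'
  unfold cqtIns at hk'
  by_cases h : l.any (fun p => p.1 == k) = true
  · rw [if_pos h] at hk'
    simp only [List.map_map, List.mem_map, Function.comp] at hk'
    obtain ⟨p, hp, hpk⟩ := hk'
    by_cases hpk' : p.1 = k
    · right; rw [if_pos (by simp [hpk'])] at hpk; simpa using hpk.symm
    · left; rw [if_neg (by simp [hpk'])] at hpk
      exact List.mem_map.mpr ⟨p, hp, hpk⟩
  · rw [if_neg h] at hk'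
    simp only [List.map_append, List.mem_append, List.map_cons, List.map_nil] at hk'
    rcases hk' with h1 | h1
    · left; exact h1
    · right; simpa using h1

lemma cqtIns_nodup (l : List ((Option (Int × Int)) × Int)) (k : Option (Int × Int)) (v : Int)
    (hnd : (l.map (fun p => p.1)).Nodup) : ((cqtIns l k v).map (fun p => p.1)).Nodup := by
  unfold cqtIns
  by_cases h : l.any (fun p => p.1 == k) = true
  · rw [if_pos h]
    rw [List.map_map]
    have : (l.map ((fun p => p.1) ∘ (fun p => if p.1 == k then (k, v) else p))) = l.map (fun p => p.1) := by
      apply List.map_congr_left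
      intro q hq
      by_cases hqk : q.1 = k <;> simp [Function.comp, hqk]
    rw [this]; exact hnd
  · rw [if_neg h]
    rw [List.map_append, List.nodup_append]
    refine ⟨hnd, by simp, fun x hx => ?_⟩
    obtain ⟨p, hp, rfl⟩ := List.mem_map.mp hx
    intro b hb
    rw [List.map_cons, List.map_nil, List.mem_singleton] at hb
    subst hb
    exact fun hpk => h (List.any_eq_true.mpr ⟨p, hp, by simp [hpk]⟩)

-- the backward DP table, one list per grid row, from the bottom up
def cqtWays (cols : Nat) : List String → List Int
  | [] => List.replicate cols 1
  | s :: rest => cqtAltRow s.toList cols (cqtWays cols rest)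

lemma cqt_keys_eq (d : PySem.Dict (Option (Int × Int)) Int) :
    d.keys = d.items.map (fun p => p.1) := rfl

-- all three dict facts for one `d[k] = d.get(k, 0) + v` update, bundled
lemma cqt_insert_all (w : Option (Int × Int) → Int) (d : PySem.Dict (Option (Int × Int)) Int)
    (k : Option (Int × Int)) (v : Int) (hnd : d.keys.Nodup) :
    (d.insert k (d.getD k 0 + v)).keys.Nodup ∧
    (∀ k' ∈ (d.insert k (d.getD k 0 + v)).keys, k' ∈ d.keys ∨ k' = k) ∧
    cqtSumW w (d.insert k (d.getD k 0 + v)).items = cqtSumW w d.items + v * w k := by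
  rw [cqt_keys_eq] at hnd
  refine ⟨?_, ?_, ?_⟩
  · rw [cqt_keys_eq, cqt_insert_items, cqt_getD_eq]
    exact cqtIns_nodup _ _ _ hnd
  · intro k' hk'
    rw [cqt_keys_eq, cqt_insert_items, cqt_getD_eq] at hk'
    rw [cqt_keys_eq]
    exact cqtIns_keys_sub _ _ _ k' hk'
  · rw [cqt_insert_items, cqt_getD_eq]
    exact cqtSumW_ins w _ _ _ hnd

-- a dict whose keys are all `none` holds at most one entry; reading 'exit' reads the whole sum
lemma cqt_final_read (w : Option (Int × Int) → Int) (hw : w none = 1)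
    (l : List ((Option (Int × Int)) × Int)) (hnd : (l.map (fun p => p.1)).Nodup)
    (hall : ∀ p ∈ l, p.1 = (none : Option (Int × Int))) :
    cqtGet l none = cqtSumW w l := by
  match l with
  | [] => simp [cqtGet, cqtSumW]
  | [p] =>
    have hp := hall p (by simp)
    simp [cqtGet, cqtSumW, hp, hw]
  | p :: q :: t =>
    exfalso
    have hp := hall p (by simp)
    have hq := hall q (by simp)
    simp [hp, hq] at hnd

-- the weight of a dict key: number of timelines reaching the exit from that state
def cqtW (grid : List String) (cols : Nat) (key : Option (Int × Int)) : Int :=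
  match key with
  | none => 1
  | some (r, c) =>
    if 0 ≤ r ∧ r < (grid.length : Int) ∧ 0 ≤ c ∧ c < (cols : Int)
    then (cqtWays cols (grid.drop (r.toNat + 1))).getD c.toNat 0
    else 0

-- which keys may occur in A's dict after iteration j-1 / before iteration j
def cqtShape (len : Int) (cols : Nat) (j : Int) (key : Option (Int × Int)) : Prop :=
  (key = none ∧ len ≤ j) ∨ ∃ c : Int, key = some (j, c) ∧ 0 ≤ c ∧ c < (cols : Int) ∧ j < len

-- unfoldings of the weight function
lemma cqtW_some (grid : List String) (cols : Nat) (r c : Int)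
    (h0 : 0 ≤ r) (h1 : r < (grid.length : Int)) (hc0 : 0 ≤ c) (hc1 : c < (cols : Int)) :
    cqtW grid cols (some (r, c)) = (cqtWays cols (grid.drop (r.toNat + 1))).getD c.toNat 0 := by
  simp [cqtW, h0, h1, hc0, hc1]

lemma cqtW_exit_row (grid : List String) (cols : Nat) (r c : Int)
    (h0 : 0 ≤ r) (h1 : r < (grid.length : Int)) (hl : (grid.length : Int) ≤ r + 1)
    (hc0 : 0 ≤ c) (hc1 : c < (cols : Int)) :
    cqtW grid cols (some (r, c)) = 1 := by
  rw [cqtW_some grid cols r c h0 h1 hc0 hc1]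
  have hdrop : grid.drop (r.toNat + 1) = [] := List.drop_eq_nil_of_le (by omega)
  rw [hdrop]
  show (List.replicate cols 1).getD c.toNat 0 = 1
  rw [List.getD_eq_getElem _ _ (by simp; omega)]
  simp

lemma cqtW_mid (grid : List String) (cols : Nat) (r c : Int)
    (h0 : 0 ≤ r) (h1 : r + 1 < (grid.length : Int)) (hc0 : 0 ≤ c) (hc1 : c < (cols : Int)) :
    cqtW grid cols (some (r, c)) =
      if (grid.getD (r.toNat + 1) "").toList.getD c.toNat ' ' = '^' then
        (if 0 < c then cqtW grid cols (some (r + 1, c - 1)) else 0) +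
        (if c < (cols : Int) - 1 then cqtW grid cols (some (r + 1, c + 1)) else 0)
      else cqtW grid cols (some (r + 1, c)) := by
  have hr1 : r.toNat + 1 < grid.length := by omega
  have hdrop : grid.drop (r.toNat + 1) = grid[r.toNat + 1] :: grid.drop (r.toNat + 2) :=
    List.drop_eq_getElem_cons hr1
  have hgetD : grid.getD (r.toNat + 1) "" = grid[r.toNat + 1] := List.getD_eq_getElem _ _ hr1
  rw [cqtW_some grid cols r c h0 (by omega) hc0 hc1, hdrop, hgetD]
  show (cqtAltRow (grid[r.toNat + 1]).toList cols (cqtWays cols (grid.drop (r.toNat + 2)))).getD c.toNat 0 = _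
  have hcn : c.toNat < cols := by omega
  rw [cqtAltRow, List.getD_eq_getElem _ _ (by simp [hcn])]
  rw [List.getElem_map, List.getElem_range]
  by_cases hch : (grid[r.toNat + 1]).toList.getD c.toNat ' ' = '^'
  · rw [if_pos hch, if_pos hch]
    congr 1
    · by_cases hcpos : 0 < c
      · rw [if_pos (by omega), if_pos hcpos,
            cqtW_some grid cols (r + 1) (c - 1) (by omega) (by omega) (by omega) (by omega)]
        have : (r + 1).toNat + 1 = r.toNat + 2 := by omega
        rw [this]
        have : (c - 1).toNat = c.toNat - 1 := by omega
        rw [this]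
      · rw [if_neg (by omega), if_neg hcpos]
    · by_cases hclt : c < (cols : Int) - 1
      · rw [if_pos (by omega), if_pos hclt,
            cqtW_some grid cols (r + 1) (c + 1) (by omega) (by omega) (by omega) (by omega)]
        have : (r + 1).toNat + 1 = r.toNat + 2 := by omega
        rw [this]
        have : (c + 1).toNat = c.toNat + 1 := by omega
        rw [this]
      · rw [if_neg (by omega), if_neg hclt]
  · rw [if_neg hch, if_neg hch,
        cqtW_some grid cols (r + 1) c (by omega) (by omega) hc0 hc1]
    have h2 : (r + 1).toNat + 1 = r.toNat + 2 := by omega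
    rw [h2]

lemma cqt_inner (grid : List String) (cols : Nat)
    (hlen : ∀ s ∈ grid, cols ≤ s.toList.length) (row : Int)
    (hrow0 : 0 ≤ row) (hrow1 : row < (grid.length : Int)) :
    ∀ (L : List ((Option (Int × Int)) × Int)) (d : PySem.Dict (Option (Int × Int)) Int),
      (∀ p ∈ L, ∃ c : Int, p.1 = some (row, c) ∧ 0 ≤ c ∧ c < (cols : Int)) →
      d.keys.Nodup →
      (∀ k ∈ d.keys, cqtShape (grid.length : Int) cols (row + 1) k) →
      (L.foldl (cqtStep grid (grid.length : Int) (cols : Int) row) d).keys.Nodup ∧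
      (∀ k ∈ (L.foldl (cqtStep grid (grid.length : Int) (cols : Int) row) d).keys,
        cqtShape (grid.length : Int) cols (row + 1) k) ∧
      cqtSumW (cqtW grid cols) (L.foldl (cqtStep grid (grid.length : Int) (cols : Int) row) d).items =
        cqtSumW (cqtW grid cols) d.items + cqtSumW (cqtW grid cols) L := by
  intro L
  induction L with
  | nil =>
    intro d hL hnd hsh
    exact ⟨hnd, hsh, by simp [cqtSumW]⟩
  | cons e t ih =>
    intro d hL hnd hsh
    obtain ⟨c, hkey, hc0, hc1⟩ := hL e (by simp)
    obtain ⟨key, v⟩ := e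
    simp only at hkey
    subst hkey
    have hshape_new : ∀ c' : Int, 0 ≤ c' → c' < (cols : Int) → (row + 1 < (grid.length : Int)) →
        cqtShape (grid.length : Int) cols (row + 1) (some (row + 1, c')) :=
      fun c' a b hm => Or.inr ⟨c', rfl, a, b, hm⟩
    -- one step of the inner loop
    have hstep : ∀ d₂ : PySem.Dict (Option (Int × Int)) Int, d₂.keys.Nodup →
        (∀ k ∈ d₂.keys, cqtShape (grid.length : Int) cols (row + 1) k) →
        (cqtStep grid (grid.length : Int) (cols : Int) row d₂ (some (row, c), v)).keys.Nodup ∧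
        (∀ k ∈ (cqtStep grid (grid.length : Int) (cols : Int) row d₂ (some (row, c), v)).keys,
          cqtShape (grid.length : Int) cols (row + 1) k) ∧
        cqtSumW (cqtW grid cols) (cqtStep grid (grid.length : Int) (cols : Int) row d₂ (some (row, c), v)).items =
          cqtSumW (cqtW grid cols) d₂.items + v * cqtW grid cols (some (row, c)) := by
      intro d₂ hnd₂ hsh₂
      by_cases hlast : (grid.length : Int) ≤ row + 1
      · -- next_row >= rows: the timeline exits
        have hred : cqtStep grid (grid.length : Int) (cols : Int) row d₂ (some (row, c), v) =
            d₂.insert none (d₂.getD none 0 + v) := by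
          simp only [cqtStep]
          rw [if_neg (fun h => h rfl), if_pos hlast]
        obtain ⟨n1, n2, n3⟩ := cqt_insert_all (cqtW grid cols) d₂ none v hnd₂
        rw [hred]
        refine ⟨n1, ?_, ?_⟩
        · intro k hk
          rcases n2 k hk with h | h
          · exact hsh₂ k h
          · exact Or.inl ⟨h, hlast⟩
        · rw [n3, cqtW_exit_row grid cols row c hrow0 hrow1 hlast hc0 hc1]
          rfl
      · -- next_row < rows
        have hr1 : row.toNat + 1 < grid.length := by omega
        have hmem : grid.getD (row.toNat + 1) "" ∈ grid := by
          rw [List.getD_eq_getElem _ _ hr1]; exact List.getElem_mem hr1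
        have hcols_le : cols ≤ (grid.getD (row.toNat + 1) "").toList.length := hlen _ hmem
        have hs : PySem.List.pyGet? grid (row + 1) = some (grid.getD (row.toNat + 1) "") := by
          have hcast : row + 1 = ((row.toNat + 1 : Nat) : Int) := by omega
          rw [hcast, PySem.List.pyGet?_natCast, List.getElem?_eq_getElem hr1,
              List.getD_eq_getElem _ _ hr1]
        have hch : PySem.Str.pyGet? (grid.getD (row.toNat + 1) "") c =
            some ((grid.getD (row.toNat + 1) "").toList.getD c.toNat ' ') := by
          have hcast : c = ((c.toNat : Nat) : Int) := by omega
          have hcn : c.toNat < (grid.getD (row.toNat + 1) "").toList.length := by omega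
          have h1 : PySem.Str.pyGet? (grid.getD (row.toNat + 1) "") c =
              (grid.getD (row.toNat + 1) "").toList[c.toNat]? := by
            conv_lhs => rw [hcast]
            exact PySem.Str.pyGet?_natCast _ _
          rw [h1, List.getElem?_eq_getElem hcn, List.getD_eq_getElem _ _ hcn]
        have hwmid := cqtW_mid grid cols row c hrow0 (by omega) hc0 hc1
        by_cases hch2 : (grid.getD (row.toNat + 1) "").toList.getD c.toNat ' ' = '^'
        · -- splitter
          have hred : cqtStep grid (grid.length : Int) (cols : Int) row d₂ (some (row, c), v) =
              (let d1 := if c > 0 then d₂.insert (some (row + 1, c - 1)) (d₂.getD (some (row + 1, c - 1)) 0 + v) else d₂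
               if c < (cols : Int) - 1 then d1.insert (some (row + 1, c + 1)) (d1.getD (some (row + 1, c + 1)) 0 + v) else d1) := by
            simp only [cqtStep]
            rw [if_neg (fun h => h rfl), if_neg hlast]
            simp only [hs, hch]
            rw [if_pos hch2]
          rw [hwmid, if_pos hch2, hred]
          by_cases hcp : c > 0
          · obtain ⟨n1, n2, n3⟩ := cqt_insert_all (cqtW grid cols) d₂ (some (row + 1, c - 1)) v hnd₂
            have hsh1 : ∀ k ∈ (d₂.insert (some (row + 1, c - 1)) (d₂.getD (some (row + 1, c - 1)) 0 + v)).keys,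
                cqtShape (grid.length : Int) cols (row + 1) k := by
              intro k hk
              rcases n2 k hk with h | h
              · exact hsh₂ k h
              · exact h ▸ hshape_new (c - 1) (by omega) (by omega) (by omega)
            by_cases hcl : c < (cols : Int) - 1
            · simp only [if_pos hcp, if_pos hcl]
              obtain ⟨m1, m2, m3⟩ := cqt_insert_all (cqtW grid cols) _ (some (row + 1, c + 1)) v n1
              refine ⟨m1, ?_, ?_⟩
              · intro k hk
                rcases m2 k hk with h | h
                · exact hsh1 k h
                · exact h ▸ hshape_new (c + 1) (by omega) (by omega) (by omega)
              · rw [m3, n3]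
                ring
            · simp only [if_pos hcp, if_neg hcl]
              refine ⟨n1, hsh1, ?_⟩
              rw [n3]
              ring
          · by_cases hcl : c < (cols : Int) - 1
            · simp only [if_neg hcp, if_pos hcl]
              obtain ⟨m1, m2, m3⟩ := cqt_insert_all (cqtW grid cols) d₂ (some (row + 1, c + 1)) v hnd₂
              refine ⟨m1, ?_, ?_⟩
              · intro k hk
                rcases m2 k hk with h | h
                · exact hsh₂ k h
                · exact h ▸ hshape_new (c + 1) (by omega) (by omega) (by omega)
              · rw [m3]
                ring
            · simp only [if_neg hcp, if_neg hcl]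
              refine ⟨hnd₂, hsh₂, ?_⟩
              ring
        · -- plain cell: straight down
          have hred : cqtStep grid (grid.length : Int) (cols : Int) row d₂ (some (row, c), v) =
              d₂.insert (some (row + 1, c)) (d₂.getD (some (row + 1, c)) 0 + v) := by
            simp only [cqtStep]
            rw [if_neg (fun h => h rfl), if_neg hlast]
            simp only [hs, hch]
            rw [if_neg hch2]
          obtain ⟨n1, n2, n3⟩ := cqt_insert_all (cqtW grid cols) d₂ (some (row + 1, c)) v hnd₂
          rw [hred, hwmid, if_neg hch2]
          refine ⟨n1, ?_, ?_⟩
          · intro k hk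
            rcases n2 k hk with h | h
            · exact hsh₂ k h
            · exact h ▸ hshape_new c hc0 hc1 (by omega)
          · rw [n3]
    rw [List.foldl_cons]
    obtain ⟨h1, h2, h3⟩ := hstep d hnd hsh
    obtain ⟨g1, g2, g3⟩ := ih _ (fun p hp => hL p (by simp [hp])) h1 h2
    refine ⟨g1, g2, ?_⟩
    rw [g3, h3]
    simp only [cqtSumW, List.map_cons, List.sum_cons]
    ring

lemma cqt_outer (grid : List String) (cols : Nat)
    (hlen : ∀ s ∈ grid, cols ≤ s.toList.length) (start : Int)
    (hs0 : 0 ≤ start) (hs1 : start < (cols : Int)) (hrows : 0 < grid.length) :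
    ∀ k : Nat, k ≤ grid.length →
      ((PySem.List.pyRange 0 (k : Int)).foldl
        (fun cur row => cur.items.foldl (cqtStep grid (grid.length : Int) (cols : Int) row) PySem.Dict.empty)
        (PySem.Dict.empty.insert (some (0, start)) 1)).keys.Nodup ∧
      (∀ key ∈ ((PySem.List.pyRange 0 (k : Int)).foldl
        (fun cur row => cur.items.foldl (cqtStep grid (grid.length : Int) (cols : Int) row) PySem.Dict.empty)
        (PySem.Dict.empty.insert (some (0, start)) 1)).keys, cqtShape (grid.length : Int) cols (k : Int) key) ∧
      cqtSumW (cqtW grid cols) ((PySem.List.pyRange 0 (k : Int)).foldl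
        (fun cur row => cur.items.foldl (cqtStep grid (grid.length : Int) (cols : Int) row) PySem.Dict.empty)
        (PySem.Dict.empty.insert (some (0, start)) 1)).items = cqtW grid cols (some (0, start)) := by
  intro k
  induction k with
  | zero =>
    intro _
    have hr : PySem.List.pyRange 0 ((0 : Nat) : Int) = [] := by
      rw [PySem.List.pyRange_zero_natCast]; rfl
    rw [hr, List.foldl_nil]
    have hitems : (PySem.Dict.empty.insert (some (0, start)) 1 :
        PySem.Dict (Option (Int × Int)) Int).items = [(some (0, start), 1)] := rfl
    refine ⟨by rw [cqt_keys_eq, hitems]; simp, ?_, ?_⟩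
    · intro key hk
      rw [cqt_keys_eq, hitems] at hk
      simp only [List.map_cons, List.map_nil, List.mem_singleton] at hk
      subst hk
      exact Or.inr ⟨start, rfl, hs0, hs1, by exact_mod_cast hrows⟩
    · rw [hitems]
      simp [cqtSumW]
  | succ k ih =>
    intro hk1
    have hk : k ≤ grid.length := by omega
    obtain ⟨n1, n2, n3⟩ := ih hk
    have hsplit : PySem.List.pyRange 0 ((k + 1 : Nat) : Int) =
        PySem.List.pyRange 0 ((k : Nat) : Int) ++ [Int.ofNat k] := by
      rw [PySem.List.pyRange_zero_natCast, PySem.List.pyRange_zero_natCast,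
          List.range_succ, List.map_append]
      rfl
    rw [hsplit, List.foldl_append]
    simp only [List.foldl_cons, List.foldl_nil]
    have hrow1 : (Int.ofNat k) < (grid.length : Int) := by
      show ((k : Nat) : Int) < (grid.length : Int); omega
    have hinner := cqt_inner grid cols hlen (Int.ofNat k)
      (show (0 : Int) ≤ ((k : Nat) : Int) by omega) hrow1
      ((PySem.List.pyRange 0 ((k : Nat) : Int)).foldl
        (fun cur row => cur.items.foldl (cqtStep grid (grid.length : Int) (cols : Int) row) PySem.Dict.empty)
        (PySem.Dict.empty.insert (some (0, start)) 1)).items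
      PySem.Dict.empty
      (by
        intro p hp
        have hkmem : p.1 ∈ ((PySem.List.pyRange 0 ((k : Nat) : Int)).foldl
            (fun cur row => cur.items.foldl (cqtStep grid (grid.length : Int) (cols : Int) row) PySem.Dict.empty)
            (PySem.Dict.empty.insert (some (0, start)) 1)).keys := by
          rw [cqt_keys_eq]
          exact List.mem_map.mpr ⟨p, hp, rfl⟩
        rcases n2 p.1 hkmem with ⟨_, hle⟩ | ⟨c, hkey, hb0, hb1, _⟩
        · exfalso
          have : (k : Int) < (grid.length : Int) := by exact_mod_cast (by omega : k < grid.length)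
          omega
        · exact ⟨c, by rw [hkey]; rfl, hb0, hb1⟩)
      (by rw [cqt_keys_eq]; simp [PySem.Dict.empty])
      (by intro kk hkk; rw [cqt_keys_eq] at hkk; simp [PySem.Dict.empty] at hkk)
    obtain ⟨g1, g2, g3⟩ := hinner
    have hcast : (Int.ofNat k) + 1 = ((k + 1 : Nat) : Int) := by
      show (k : Int) + 1 = ((k + 1 : Nat) : Int); push_cast; ring
    refine ⟨g1, ?_, ?_⟩
    · intro key hkey
      have := g2 key hkey
      rwa [hcast] at this
    · rw [g3, n3]
      simp [cqtSumW, PySem.Dict.empty]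


lemma cqt_findS_eq (row0 : String) (l : List Nat) (hl : ∀ c ∈ l, c < row0.toList.length) :
    cqtFindS row0 (l.map (fun c => Int.ofNat c)) =
      ((l.find? (fun c => row0.toList.getD c ' ' == 'S')).map (fun c => Int.ofNat c)).getD (-1) := by
  induction l with
  | nil => rfl
  | cons c t ih =>
    have hc : c < row0.toList.length := hl c (by simp)
    have hget : PySem.Str.pyGet? row0 (Int.ofNat c) = some (row0.toList[c]) := by
      rw [show (Int.ofNat c) = (c : Int) from rfl, PySem.Str.pyGet?_natCast,
          List.getElem?_eq_getElem hc]
    have hgetD : row0.toList.getD c ' ' = row0.toList[c] := List.getD_eq_getElem _ _ hc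
    rw [List.map_cons]
    simp only [cqtFindS]
    rw [List.find?_cons, hget, hgetD]
    by_cases hS : row0.toList[c] = 'S'
    · rw [if_pos (by rw [hS])]
      have hb : (row0.toList[c] == 'S') = true := by simp [hS]
      rw [hb]
      rfl
    · rw [if_neg (by simp [hS])]
      have hb : (row0.toList[c] == 'S') = false := by simp [hS]
      rw [hb]
      exact ih (fun x hx => hl x (by simp [hx]))

lemma cqt_ways_foldl (cols : Nat) (rest : List String) :
    ((rest.map String.toList).reverse).foldl (fun w nxt => cqtAltRow nxt cols w)
      (List.replicate cols 1) = cqtWays cols rest := by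
  rw [List.foldl_reverse, List.foldr_map]
  induction rest with
  | nil => rfl
  | cons s t ih => simp only [List.foldr_cons, cqtWays, ih]

-- ===== VERDICT (by name: the statement is the Claim_ definition above) =====
theorem count_quantum_timelines_spec : Claim_equal_count_quantum_timelines := by
  intro grid _ hpre
  unfold Spec_count_quantum_timelines
  cases grid with
  | nil => rfl
  | cons row0 rest =>
    simp only [count_quantum_timelines, count_quantum_timelines_alt, List.headD_cons]
    have hpos : (0 : Int) < ((row0 :: rest).length : Int) := by
      exact_mod_cast Nat.succ_pos rest.length
    rw [if_pos hpos, PySem.Str.len_eq]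
    have hbridge : PySem.List.pyRange 0 ((row0.toList.length : Nat) : Int) =
        (List.range row0.toList.length).map (fun c => Int.ofNat c) := by
      rw [PySem.List.pyRange_zero_natCast]
      rfl
    rw [hbridge, cqt_findS_eq row0 (List.range row0.toList.length)
      (fun c hc => List.mem_range.mp hc)]
    cases hF : (List.range row0.toList.length).find?
        (fun c => row0.toList.getD c ' ' == 'S') with
    | none => simp only [Option.map_none, Option.getD_none]; rfl
    | some st =>
      simp only [Option.map_some, Option.getD_some]
      have hst : st < row0.toList.length := List.mem_range.mp (List.mem_of_find?_eq_some hF)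
      have hpred : row0.toList.getD st ' ' = 'S' := by
        have := List.find?_some hF
        simpa using this
      have hSmem : 'S' ∈ row0.toList := by
        rw [List.getD_eq_getElem _ _ hst] at hpred
        exact hpred ▸ List.getElem_mem hst
      have hlen : ∀ s ∈ (row0 :: rest), row0.toList.length ≤ s.toList.length := by
        rcases hpre with h | h | h
        · exact absurd h (by simp)
        · exact absurd hSmem (by simpa using h)
        · simpa using h
      rw [if_neg (show ¬ (Int.ofNat st = -1) from fun h => by
        have h' : ((st : Nat) : Int) = -1 := h
        omega)]
      obtain ⟨n1, n2, n3⟩ := cqt_outer (row0 :: rest) row0.toList.length hlen (Int.ofNat st)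
        (show (0 : Int) ≤ ((st : Nat) : Int) by omega)
        (show ((st : Nat) : Int) < ((row0.toList.length : Nat) : Int) by omega)
        (by simp) ((row0 :: rest).length) (le_refl _)
      rw [cqt_getD_eq, cqt_final_read (cqtW (row0 :: rest) row0.toList.length) rfl _
        (by rw [← cqt_keys_eq]; exact n1)
        (by
          intro p hp
          have hk : p.1 ∈ ((PySem.List.pyRange 0 (((row0 :: rest).length : Nat) : Int)).foldl
              (fun cur row => cur.items.foldl
                (cqtStep (row0 :: rest) ((row0 :: rest).length : Int) (row0.toList.length : Int) row)
                PySem.Dict.empty)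
              (PySem.Dict.empty.insert (some (0, Int.ofNat st)) 1)).keys := by
            rw [cqt_keys_eq]; exact List.mem_map.mpr ⟨p, hp, rfl⟩
          rcases n2 p.1 hk with ⟨hnone, _⟩ | ⟨c, _, _, _, hlt⟩
          · exact hnone
          · exact absurd hlt (by omega)), n3]
      rw [cqtW_some (row0 :: rest) row0.toList.length 0 (Int.ofNat st) le_rfl
        (by simp) (show (0 : Int) ≤ ((st : Nat) : Int) by omega)
        (show ((st : Nat) : Int) < ((row0.toList.length : Nat) : Int) by omega)]
      rw [cqt_ways_foldl]
      simp
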